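-- pv_equiv track=rewrite | github.com/bluedelaw/COMP7082_Group_8 | ui/actions.py | update_history_display
-- ===== SOURCE A (Python) =====
-- from typing import Tuple, List, Dict
--
-- def update_history_display(history):
--     """
--     Convert the flat [(role, message)] history into Chatbot-style
--     [[user_message, assistant_message], ...] pairs.
--
--     - Consecutive user messages get flushed with empty assistant text.
--     - Orphan assistant messages get paired with "" as the user side.
--     """
--     if not history:
--         return []
--
--     pairs: List[List[str]] = []
--     pending_user: str | None = None
--
--     for role, message in history:
--         if not message:
--             continue
--         text = str(message)
--
--         if role == "user":
--             # If there was a previous user without a reply yet, flush it.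
--             if pending_user is not None:
--                 pairs.append([pending_user, ""])
--             pending_user = text
--         else:  # assistant
--             if pending_user is None:
--                 # Assistant with no explicit user just before
--                 pairs.append(["", text])
--             else:
--                 pairs.append([pending_user, text])
--                 pending_user = None
--
--     # Trailing user with no assistant reply yet
--     if pending_user is not None:
--         pairs.append([pending_user, ""])
--
--     return pairs
-- ===== SOURCE B (Python) =====
-- def update_history_display(history):
--     # Same pairing by explicit index over a pre-filtered list instead of a
--     # pending_user state machine.
--     items = [(role, str(message)) for role, message in history if message]
--     pairs = []
--     i = 0
--     n = len(items)
--     while i < n: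
--         role, text = items[i]
--         if role == "user":
--             if i + 1 < n and items[i + 1][0] != "user":
--                 pairs.append([text, items[i + 1][1]])
--                 i += 2
--             else:
--                 pairs.append([text, ""])
--                 i += 1
--         else:
--             pairs.append(["", text])
--             i += 1
--     return pairs
-- ===== Notes on version B (the rewrite author's own statement) =====
-- stated objective: alternative
-- what changed: Replaced the pending_user state machine with a stateless pass: filter out falsy messages once, then walk the filtered list by index, pairing a user message with the immediately following assistant message (consuming two items) and emitting one-sided pairs otherwise.
import Mathlib
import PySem

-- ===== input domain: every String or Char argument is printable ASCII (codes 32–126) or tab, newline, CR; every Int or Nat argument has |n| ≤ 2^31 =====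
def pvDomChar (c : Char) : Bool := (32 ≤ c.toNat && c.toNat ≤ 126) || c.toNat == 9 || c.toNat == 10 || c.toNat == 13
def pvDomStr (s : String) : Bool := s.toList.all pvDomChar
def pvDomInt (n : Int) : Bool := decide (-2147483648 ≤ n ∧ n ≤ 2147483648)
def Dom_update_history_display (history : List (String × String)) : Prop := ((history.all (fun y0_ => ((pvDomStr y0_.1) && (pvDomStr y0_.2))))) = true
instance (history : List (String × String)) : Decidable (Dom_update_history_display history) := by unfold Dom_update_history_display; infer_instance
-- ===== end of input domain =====

-- B replaces A's pending_user state machine with a stateless indexed walk over a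
-- pre-filtered list (objective: alternative decomposition, same cost).


-- ===== PORT A =====
-- A's for-loop over (role, message) with state (pairs, pending_user), skipping
-- empty messages, then the trailing flush. str(message) is the identity on String.
def pvALoop : List (String × String) → List (List String) → Option String → List (List String)
  | [], pairs, pending =>
      match pending with
      | some u => pairs ++ [[u, ""]]
      | none => pairs
  | (role, message) :: rest, pairs, pending =>
      if message == "" then pvALoop rest pairs pending
      else
        let text := message
        if role == "user" then
          match pending with
          | some u => pvALoop rest (pairs ++ [[u, ""]]) (some text)
          | none => pvALoop rest pairs (some text)
        else
          match pending with
          | none => pvALoop rest (pairs ++ [["", text]]) none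
          | some u => pvALoop rest (pairs ++ [[u, text]]) none

def update_history_display (history : List (String × String)) : List (List String) :=
  if history = [] then [] else pvALoop history [] none

-- ===== PORT B =====
-- B: filter out empty messages once, then walk by index: a user message followed
-- by an assistant consumes two items, anything else emits a one-sided pair.
def pvPairUp : List (String × String) → List (List String)
  | [] => []
  | (role, text) :: rest =>
      if role == "user" then
        match rest with
        | (r2, t2) :: rest2 =>
            if r2 != "user" then [text, t2] :: pvPairUp rest2
            else [text, ""] :: pvPairUp ((r2, t2) :: rest2)
        | [] => [[text, ""]]
      else ["", text] :: pvPairUp rest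

def update_history_display_alt (history : List (String × String)) : List (List String) :=
  pvPairUp (history.filter (fun p => p.2 != ""))

-- ===== PRECONDITION & SPEC =====
def Spec_update_history_display (history : List (String × String)) (out : List (List String)) : Prop := out = update_history_display_alt history
instance (history : List (String × String)) (out : List (List String)) : Decidable (Spec_update_history_display history out) := by unfold Spec_update_history_display; infer_instance

-- ===== CLAIM (what is proved, stated in full; the proofs are below) =====
def Claim_equal_update_history_display : Prop := ∀ (history : List (String × String)), Dom_update_history_display history → Spec_update_history_display history (update_history_display history)

-- ===== LEMMAS AND PROOFS =====

-- Proof-side helper: what A's loop produces from a pending user u on a filtered list.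
def pvConsume (u : String) : List (String × String) → List (List String)
  | [] => [[u, ""]]
  | (r, t) :: rest =>
      if r == "user" then [u, ""] :: pvConsume t rest
      else [u, t] :: pvPairUp rest

theorem pvPairUp_user (l : List (String × String)) :
    ∀ m, pvPairUp (("user", m) :: l) = pvConsume m l := by
  induction l with
  | nil => intro m; simp [pvPairUp, pvConsume]
  | cons hd tl ih =>
      intro m
      obtain ⟨r2, t2⟩ := hd
      by_cases h2 : r2 = "user"
      · subst h2
        simp [pvPairUp, pvConsume, ih t2]
      · simp [pvPairUp, pvConsume, h2]

theorem pvPairUp_other (r t : String) (l : List (String × String)) (h : ¬ r = "user") :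
    pvPairUp ((r, t) :: l) = ["", t] :: pvPairUp l := by
  cases l with
  | nil => simp [pvPairUp, h]
  | cons hd tl => obtain ⟨a, b⟩ := hd; simp [pvPairUp, h]

theorem pvALoop_eq (l : List (String × String)) :
    ∀ pairs pending, pvALoop l pairs pending =
      pairs ++ (match pending with
        | none => pvPairUp (l.filter (fun p => p.2 != ""))
        | some u => pvConsume u (l.filter (fun p => p.2 != ""))) := by
  induction l with
  | nil =>
      intro pairs pending
      cases pending <;> simp [pvALoop, pvConsume, pvPairUp]
  | cons hd tl ih =>
      intro pairs pending
      obtain ⟨role, message⟩ := hd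
      by_cases hm : message = ""
      · cases pending <;> simp [pvALoop, hm, ih]
      · by_cases hr : role = "user"
        · subst hr
          cases pending with
          | none =>
              simp [pvALoop, hm, ih, pvPairUp_user]
          | some u =>
              simp [pvALoop, hm, ih, pvConsume]
        · cases pending with
          | none =>
              simp [pvALoop, hm, hr, ih, pvPairUp_other role message _ hr]
          | some u =>
              simp [pvALoop, hm, hr, ih, pvConsume]

-- ===== VERDICT (by name: the statement is the Claim_ definition above) =====
theorem update_history_display_spec : Claim_equal_update_history_display := by
  intro history _
  unfold Spec_update_history_display update_history_display update_history_display_alt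
  by_cases h : history = []
  · simp [h, pvPairUp]
  · simp [h, pvALoop_eq]
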